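-- pv_equiv track=rewrite | github.com/KrzysiekMiskowicz/WDI | Ćwiczenia_9_&_10/Zadanie_Dodatkowe/Zadanie_13.py | binary_system
-- ===== SOURCE A (Python) =====
-- def binary_system(n):
--     result = 0
--     waga = 0
--     while n != 0:
--         result += (n % 2) * 10 ** waga
--         waga += 1
--         n //= 2
--
--     return result
-- ===== SOURCE B (Python) =====
-- def binary_system(n):
--     # MSB-first Horner: walk the bit indices from the top down with shifts,
--     # no division, no power-of-ten weight accumulator.
--     result = 0
--     for i in range(n.bit_length() - 1, -1, -1):
--         result = 10 * result + ((n >> i) & 1)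
--     return result
-- ===== Notes on version B (the rewrite author's own statement) =====
-- stated objective: alternative
-- what changed: Replaces the LSB-first while-loop that repeatedly divides n and maintains a power-of-ten weight with an MSB-first Horner fold over the bit indices bit_length()-1..0 read via shift-and-mask; Pre_ excludes negative n, where A loops forever (repeated floor halving never reaches zero) while B returns a value.
import Mathlib
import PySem

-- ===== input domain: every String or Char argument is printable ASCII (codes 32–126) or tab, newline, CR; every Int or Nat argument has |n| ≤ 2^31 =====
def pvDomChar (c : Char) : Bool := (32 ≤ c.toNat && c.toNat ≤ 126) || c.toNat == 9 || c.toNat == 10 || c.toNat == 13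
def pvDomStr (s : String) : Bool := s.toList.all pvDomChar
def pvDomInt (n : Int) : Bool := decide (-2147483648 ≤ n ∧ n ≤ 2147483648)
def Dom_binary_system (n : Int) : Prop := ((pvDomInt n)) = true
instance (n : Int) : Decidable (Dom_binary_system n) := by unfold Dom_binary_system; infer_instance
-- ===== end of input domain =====

-- B replaces A's LSB-first divide-and-weigh loop with an MSB-first Horner fold
-- over the bit indices bit_length()-1..0 read by shift-and-mask (alternative;
-- equal wherever A returns).

-- ===== PORT A =====
-- A's while-loop; fuel (n.natAbs + 1, always enough on Pre_) only makes the
-- recursion total — state (n, result, waga) and the step are exactly A's.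
-- waga is A's weight counter: starts at zero and is only incremented, so Nat.
def binary_systemLoop : Nat → Int → Int → Nat → Int
  | 0, _, result, _ => result
  | fuel + 1, n, result, waga =>
    if n ≠ 0 then
      binary_systemLoop fuel (PySem.Int.floordiv n 2)
        (result + PySem.Int.mod n 2 * 10 ^ waga) (waga + 1)
    else result

def binary_system (n : Int) : Int := binary_systemLoop (n.natAbs + 1) n 0 0

-- ===== PORT B =====
-- B's for-loop over range(n.bit_length()-1, -1, -1) is a foldl over pyRange;
-- (n >> i) & 1 is shift-and-mask via PySem.Int.band. i ≥ 0 on every index the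
-- range yields, so the Nat shift amount i.toNat is exactly Python's n >> i.
def binary_system_alt (n : Int) : Int :=
  (PySem.List.pyRange ((PySem.Int.bitLength n : Int) - 1) (-1) (-1)).foldl
    (fun result i => 10 * result + PySem.Int.band (n >>> i.toNat) 1) 0

-- ===== PRECONDITION & SPEC =====
-- For negative n the Python A never returns (repeated floor halving converges to minus one and the loop
-- runs forever), so those inputs are excluded.
def Pre_binary_system (n : Int) : Prop := 0 ≤ n
instance (n : Int) : Decidable (Pre_binary_system n) := by unfold Pre_binary_system; infer_instance
def pvWitness_binary_system : Int := (6)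
def Spec_binary_system (n : Int) (out : Int) : Prop := out = binary_system_alt n
instance (n : Int) (out : Int) : Decidable (Spec_binary_system n out) := by unfold Spec_binary_system; infer_instance

-- ===== CLAIM (what is proved, stated in full; the proofs are below) =====
def Claim_equal_binary_system : Prop := ∀ (n : Int), Dom_binary_system n → Pre_binary_system n → Spec_binary_system n (binary_system n)

-- ===== LEMMAS AND PROOFS =====

-- The common mathematical value: Horner on the binary digits of a Nat.
def pvG : Nat → Int
  | 0 => 0
  | m + 1 => 10 * pvG ((m + 1) / 2) + ((m + 1) % 2 : Nat)

lemma pvG_step (m : Nat) : pvG m = 10 * pvG (m / 2) + ((m % 2 : Nat) : Int) := by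
  cases m with
  | zero => simp [pvG]
  | succ k => simp [pvG]

-- ----- A's loop computes pvG -----

lemma pvFloordiv_two (n : Int) (h : 0 ≤ n) :
    PySem.Int.floordiv n 2 = ((n.toNat / 2 : Nat) : Int) := by
  simp [PySem.Int.floordiv, Int.fdiv_eq_ediv]
  omega

lemma pvMod_two (n : Int) (h : 0 ≤ n) :
    PySem.Int.mod n 2 = ((n.toNat % 2 : Nat) : Int) := by
  simp [PySem.Int.mod, Int.fmod_eq_emod]
  omega

lemma loop_spec : ∀ (fuel : Nat) (n : Int) (result : Int) (waga : Nat),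
    0 ≤ n → n.toNat < 2 ^ fuel →
    binary_systemLoop fuel n result waga = result + pvG n.toNat * 10 ^ waga := by
  intro fuel
  induction fuel with
  | zero =>
    intro n result waga hn hlt
    have : n.toNat = 0 := by omega
    simp [binary_systemLoop, this, pvG]
  | succ f ih =>
    intro n result waga hn hlt
    by_cases h0 : n = 0
    · simp [binary_systemLoop, h0, pvG]
    · rw [binary_systemLoop]
      simp only [h0, ne_eq, not_false_eq_true, if_true]
      rw [pvFloordiv_two n hn, pvMod_two n hn]
      have hstep : (((n.toNat / 2 : Nat) : Int)).toNat < 2 ^ f := by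
        rw [Int.toNat_natCast]
        have := hlt; rw [pow_succ] at this; omega
      rw [ih _ _ _ (by positivity) hstep]
      rw [Int.toNat_natCast]
      rw [pvG_step n.toNat]
      push_cast
      ring

lemma pvFuel_enough (n : Int) (h : 0 ≤ n) : n.toNat < 2 ^ (n.natAbs + 1) := by
  have h1 : n.natAbs = n.toNat := by omega
  rw [h1]
  calc n.toNat < 2 ^ n.toNat := Nat.lt_two_pow_self
    _ ≤ 2 ^ (n.toNat + 1) := Nat.pow_le_pow_right (by norm_num) (by omega)

-- ----- B's fold computes pvG -----

-- Splitting off the top bit of the low k+1 bits.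
lemma pvG_split : ∀ (k m : Nat),
    pvG (m % 2 ^ (k + 1)) = ((m / 2 ^ k % 2 : Nat) : Int) * 10 ^ k + pvG (m % 2 ^ k) := by
  intro k
  induction k with
  | zero =>
    intro m
    have h2 : m % 2 < 2 := Nat.mod_lt m (by norm_num)
    interval_cases h : (m % 2) <;> simp [pvG, Nat.mod_one, h]
  | succ k ih =>
    intro m
    have hsplit : ∀ t : Nat, m % (2 ^ (t + 1)) = m % 2 + 2 * (m / 2 % 2 ^ t) := by
      intro t
      rw [pow_succ, mul_comm]
      exact Nat.mod_mul
    have hdiv : ∀ x r : Nat, r < 2 → (r + 2 * x) / 2 = x := by intro x r h; omega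
    have hmod : ∀ x r : Nat, r < 2 → (r + 2 * x) % 2 = r := by intro x r h; omega
    have hr : m % 2 < 2 := Nat.mod_lt m (by norm_num)
    rw [hsplit (k + 1), pvG_step, hdiv _ _ hr, hmod _ _ hr,
        hsplit k, pvG_step (m % 2 + 2 * (m / 2 % 2 ^ k)), hdiv _ _ hr, hmod _ _ hr]
    rw [ih (m / 2)]
    have hdd : m / 2 / 2 ^ k = m / 2 ^ (k + 1) := by
      rw [Nat.div_div_eq_div_mul, ← pow_succ']
    rw [hdd]
    push_cast
    ring

-- (n >> k) & 1 is bit k of a nonnegative n.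
lemma pvBit (n : Int) (h : 0 ≤ n) (k : Nat) :
    PySem.Int.band (n >>> ((k : Nat) : Int)) 1 = ((n.toNat / 2 ^ k % 2 : Nat) : Int) := by
  conv_lhs => rw [show n = ((n.toNat : Nat) : Int) by omega]
  rw [Int.shiftRight_natCast, PySem.Int.band_one,
      PySem.Int.mod_eq_emod_of_pos (by norm_num), Nat.shiftRight_eq_div_pow]
  omega

lemma fold_spec (n : Int) (h : 0 ≤ n) : ∀ (k : Nat) (a : Int),
    (PySem.List.pyRange ((k : Int) - 1) (-1) (-1)).foldl
      (fun result i => 10 * result + PySem.Int.band (n >>> i.toNat) 1) a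
    = a * 10 ^ k + pvG (n.toNat % 2 ^ k) := by
  intro k
  induction k with
  | zero =>
    intro a
    simp [Nat.mod_one, pvG]
  | succ k ih =>
    intro a
    have hcast : ((k + 1 : Nat) : Int) - 1 = (k : Int) := by push_cast; ring
    rw [hcast, PySem.List.pyRange_neg_one_cons (by omega)]
    simp only [List.foldl_cons, Int.toNat_natCast]
    rw [ih, pvBit n h k, pvG_split k n.toNat]
    ring

-- ===== VERDICT (by name: the statement is the Claim_ definition above) =====
theorem binary_system_spec : Claim_equal_binary_system := by
  intro n _ hpre
  have hpre' : (0:Int) ≤ n := hpre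
  unfold Spec_binary_system binary_system binary_system_alt
  rw [loop_spec _ _ _ _ hpre' (pvFuel_enough n hpre'),
      fold_spec n hpre' (PySem.Int.bitLength n) 0]
  have hlt : n.toNat < 2 ^ PySem.Int.bitLength n := by
    have := PySem.Int.lt_two_pow_bitLength n
    omega
  rw [Nat.mod_eq_of_lt hlt]
  ring
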